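-- pv_equiv track=rewrite | github.com/omkarnagarkar55/Striver-SDE-Practice | Day12_Heaps/1-Min-Heap.py | minHeap
-- ===== SOURCE A (Python) =====
-- def heapify(arr,i):
--     n = len(arr)
--     left = 2 * i + 1
--     right = 2 * i + 2
--     mi = i
--
--     if left < n and arr[left] < arr[mi]:
--         mi = left
--     if right < n and arr[right] < arr[mi]:
--         mi = right
--
--     if mi != i:
--         arr[i], arr[mi] = arr[mi], arr[i]
--         heapify(arr, mi)
--
-- def minHeap(N: int, Q: [[]]) -> []:
--     arr = []
--     removed_elements = []
--
--     for query in Q: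
--         if query[0] == 0:  # Insertion
--             arr.append(query[1])
--             i = len(arr) - 1
--             # Heapify up
--             while i > 0 and arr[(i - 1) // 2] > arr[i]:
--                 arr[(i - 1) // 2], arr[i] = arr[i], arr[(i - 1) // 2]
--                 i = (i - 1) // 2
--
--         else:  # Removing min
--             if len(arr) > 1:
--                 removed_elements.append(arr[0])
--                 arr[0] = arr.pop()
--                 heapify(arr, 0)
--             elif arr:
--                 removed_elements.append(arr.pop())
--
--     return removed_elements
-- ===== SOURCE B (Python) =====
-- import bisect
--
-- def minHeap(N: int, Q: [[]]) -> []: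
--     arr = []  # kept sorted ascending
--     removed_elements = []
--     for query in Q:
--         if query[0] == 0:
--             bisect.insort(arr, query[1])
--         elif arr:
--             removed_elements.append(arr.pop(0))
--     return removed_elements
-- ===== Notes on version B (the rewrite author's own statement) =====
-- stated objective: simpler
-- what changed: Replaces the binary-heap array with its sift-up loop and recursive heapify by a single always-sorted list: ordered insertion (bisect.insort) on insert, pop(0) on remove; the len>1/len==1 remove branches collapse into one.
import Mathlib
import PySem

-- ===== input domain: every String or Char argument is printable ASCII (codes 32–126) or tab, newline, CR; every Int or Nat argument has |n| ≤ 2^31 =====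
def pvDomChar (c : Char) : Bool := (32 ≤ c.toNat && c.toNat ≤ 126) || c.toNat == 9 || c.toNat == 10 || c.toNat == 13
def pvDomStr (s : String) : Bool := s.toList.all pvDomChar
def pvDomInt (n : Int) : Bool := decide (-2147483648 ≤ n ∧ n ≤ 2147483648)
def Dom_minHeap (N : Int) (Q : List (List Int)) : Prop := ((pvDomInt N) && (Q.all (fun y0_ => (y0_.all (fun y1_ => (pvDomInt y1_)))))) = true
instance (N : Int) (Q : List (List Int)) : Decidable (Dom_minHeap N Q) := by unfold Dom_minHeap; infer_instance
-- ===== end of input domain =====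

-- B maintains one always-sorted list (ordered insert / pop front) instead of A's binary heap
-- with its sift-up loop and recursive heapify: simpler structure, same extracted values.

-- ===== PORT A =====
-- Python's simultaneous swap arr[i], arr[j] = arr[j], arr[i]; indices are Nat because every
-- index A uses is provably nonnegative (0, children 2i+1/2i+2, parent (i-1)//2 with i>0,
-- len-1 on nonempty lists), and (i-1)//2 on Nat agrees with Python floor division for i ≥ 0.
-- Every getD access below is guarded in range when A runs, so getD is exact here.
def pvSwap (l : List Int) (i j : Nat) : List Int :=
  (l.set i (l.getD j 0)).set j (l.getD i 0)

-- heapify's selection of mi: the two sequential ifs of A (left = 2i+1, right = 2i+2 inlined)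
def heapifyMi (arr : List Int) (i : Nat) : Nat :=
  if 2 * i + 2 < arr.length ∧
      arr.getD (2 * i + 2) 0 <
        arr.getD (if 2 * i + 1 < arr.length ∧ arr.getD (2 * i + 1) 0 < arr.getD i 0
                  then 2 * i + 1 else i) 0
  then 2 * i + 2
  else if 2 * i + 1 < arr.length ∧ arr.getD (2 * i + 1) 0 < arr.getD i 0 then 2 * i + 1 else i

lemma heapifyMi_range (arr : List Int) (i : Nat) :
    heapifyMi arr i = i ∨ (i < heapifyMi arr i ∧ heapifyMi arr i < arr.length) := by
  unfold heapifyMi; split_ifs <;> omega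

-- literal port of helper heapify (recursive sift-down)
def heapifyA (arr : List Int) (i : Nat) : List Int :=
  if _h : heapifyMi arr i ≠ i then
    heapifyA (pvSwap arr i (heapifyMi arr i)) (heapifyMi arr i)
  else arr
termination_by arr.length - i
decreasing_by
  have h1 := heapifyMi_range arr i
  simp only [pvSwap, List.length_set]
  omega

-- the 'heapify up' while-loop of the insert branch
def siftUpA (arr : List Int) (i : Nat) : List Int :=
  if _h : 0 < i ∧ arr.getD ((i - 1) / 2) 0 > arr.getD i 0 then
    siftUpA (pvSwap arr ((i - 1) / 2) i) ((i - 1) / 2)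
  else arr
termination_by i
decreasing_by omega

def stepA (s : List Int × List Int) (q : List Int) : List Int × List Int :=
  if q.getD 0 0 = 0 then
    let arr := s.1 ++ [q.getD 1 0]
    (siftUpA arr (arr.length - 1), s.2)
  else if s.1.length > 1 then
    let arr := (s.1.dropLast).set 0 (s.1.getD (s.1.length - 1) 0)  -- arr[0] = arr.pop()
    (heapifyA arr 0, s.2 ++ [s.1.getD 0 0])
  else if s.1.length ≠ 0 then
    ([], s.2 ++ [s.1.getD (s.1.length - 1) 0])                     -- append(arr.pop())
  else s

def minHeap (N : Int) (Q : List (List Int)) : List Int :=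
  (Q.foldl stepA ([], [])).2

-- ===== PORT B =====
-- bisect.insort: insert after existing equal elements (ordered insertion)
def insortB (x : Int) : List Int → List Int
  | [] => [x]
  | y :: ys => if x < y then x :: y :: ys else y :: insortB x ys

def stepB (s : List Int × List Int) (q : List Int) : List Int × List Int :=
  if q.getD 0 0 = 0 then (insortB (q.getD 1 0) s.1, s.2)
  else
    match s.1 with
    | [] => s
    | y :: ys => (ys, s.2 ++ [y])

def minHeap_alt (N : Int) (Q : List (List Int)) : List Int :=
  (Q.foldl stepB ([], [])).2

-- ===== PRECONDITION & SPEC =====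
-- Pre_ excludes exactly the inputs where the Python A raises IndexError: a query that is the
-- empty list (query[0] fails) or an insert query [0] with no value (query[1] fails).
def Pre_minHeap (N : Int) (Q : List (List Int)) : Prop :=
  ∀ q ∈ Q, q ≠ [] ∧ (q.getD 0 0 = 0 → 2 ≤ q.length)
instance (N : Int) (Q : List (List Int)) : Decidable (Pre_minHeap N Q) := by
  unfold Pre_minHeap; infer_instance

def pvWitness_minHeap : Int × List (List Int) := (4, [[0, 3], [0, 1], [0, 2], [1], [1]])

def Spec_minHeap (N : Int) (Q : List (List Int)) (out : List Int) : Prop := out = minHeap_alt N Q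
instance (N : Int) (Q : List (List Int)) (out : List Int) : Decidable (Spec_minHeap N Q out) := by
  unfold Spec_minHeap; infer_instance

-- ===== CLAIM (what is proved, stated in full; the proofs are below) =====
def Claim_equal_minHeap : Prop := ∀ (N : Int) (Q : List (List Int)), Dom_minHeap N Q → Pre_minHeap N Q → Spec_minHeap N Q (minHeap N Q)

-- ===== LEMMAS AND PROOFS =====

-- heap property: every non-root entry is at least its parent
def IsHeap (l : List Int) : Prop :=
  ∀ j : Nat, 1 ≤ j → j < l.length → l.getD ((j - 1) / 2) 0 ≤ l.getD j 0

-- heap except possibly the edge above node i (sift-up)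
def AHU (l : List Int) (i : Nat) : Prop :=
  ∀ j : Nat, 1 ≤ j → j < l.length → j ≠ i → l.getD ((j - 1) / 2) 0 ≤ l.getD j 0

-- heap except possibly the edges below node i (sift-down)
def AHD (l : List Int) (i : Nat) : Prop :=
  ∀ j : Nat, 1 ≤ j → j < l.length → (j - 1) / 2 ≠ i → l.getD ((j - 1) / 2) 0 ≤ l.getD j 0

-- the "skip" bound: parent(i) is at most every child of i
def SKP (l : List Int) (i : Nat) : Prop :=
  ∀ j : Nat, 1 ≤ j → j < l.length → (j - 1) / 2 = i → 0 < i → l.getD ((i - 1) / 2) 0 ≤ l.getD j 0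

-- simulation invariant: B's list is a sorted permutation of A's heap array
def HInv (a b : List Int) : Prop := b.Perm a ∧ b.Pairwise (· ≤ ·) ∧ IsHeap a

lemma length_pvSwap (l : List Int) (i j : Nat) : (pvSwap l i j).length = l.length := by
  simp [pvSwap]

lemma getD_pvSwap (l : List Int) (i j k : Nat) (hi : i < l.length) (hj : j < l.length) :
    (pvSwap l i j).getD k 0 =
      if k = j then l.getD i 0 else if k = i then l.getD j 0 else l.getD k 0 := by
  by_cases hk : k < l.length
  · have hk' : k < (pvSwap l i j).length := by rw [length_pvSwap]; exact hk
    rw [List.getD_eq_getElem _ _ hk']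
    simp only [pvSwap, List.getElem_set]
    have ek : l[k] = l.getD k 0 := (List.getD_eq_getElem l 0 hk).symm
    rw [ek]
    split_ifs <;> first | rfl | omega
  · have hk2 : l.length ≤ k := Nat.le_of_not_lt hk
    rw [List.getD_eq_default _ _ (by rw [length_pvSwap]; exact hk2),
      if_neg (by omega), if_neg (by omega), List.getD_eq_default _ _ hk2]

lemma getD_cons_set_perm (x : Int) : ∀ (xs : List Int) (k : Nat), k < xs.length →
    (xs.getD k 0 :: xs.set k x).Perm (x :: xs) := by
  intro xs
  induction xs with
  | nil => intro k hk; simp at hk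
  | cons y ys ih =>
    intro k hk
    cases k with
    | zero => simpa using List.Perm.swap x y ys
    | succ m =>
      have hm : m < ys.length := by simpa using hk
      simpa using ((List.Perm.swap y (ys.getD m 0) (ys.set m x)).trans
        (((ih m hm)).cons y)).trans (List.Perm.swap x y ys)

lemma pvSwap_perm : ∀ (l : List Int) (i j : Nat), i < l.length → j < l.length →
    (pvSwap l i j).Perm l := by
  intro l
  induction l with
  | nil => intro i j hi _; simp at hi
  | cons x xs ih =>
    intro i j hi hj
    cases i with
    | zero =>
      cases j with
      | zero => simp [pvSwap]
      | succ m =>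
        have hm : m < xs.length := by simpa using hj
        simpa [pvSwap] using getD_cons_set_perm x xs m hm
    | succ p =>
      cases j with
      | zero =>
        have hp : p < xs.length := by simpa using hi
        simpa [pvSwap] using getD_cons_set_perm x xs p hp
      | succ m =>
        have hp : p < xs.length := by simpa using hi
        have hm : m < xs.length := by simpa using hj
        simpa [pvSwap] using (ih p m hp hm).cons x

lemma siftUp_correct (l : List Int) (i : Nat) (hi : i < l.length) (hA : AHU l i) (hS : SKP l i) :
    IsHeap (siftUpA l i) ∧ (siftUpA l i).Perm l := by
  rw [siftUpA]
  split_ifs with h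
  · obtain ⟨hi0, hgt⟩ := h
    have hpi : (i - 1) / 2 < i := by omega
    have hpl : (i - 1) / 2 < l.length := lt_trans hpi hi
    have hlen : (pvSwap l ((i - 1) / 2) i).length = l.length := length_pvSwap l _ i
    have hg : ∀ k, (pvSwap l ((i - 1) / 2) i).getD k 0 =
        if k = i then l.getD ((i - 1) / 2) 0
        else if k = (i - 1) / 2 then l.getD i 0 else l.getD k 0 :=
      fun k => getD_pvSwap l ((i - 1) / 2) i k hpl hi
    have hA' : AHU (pvSwap l ((i - 1) / 2) i) ((i - 1) / 2) := by
      intro j hj1 hjl hjp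
      rw [hlen] at hjl
      rw [hg j, hg ((j - 1) / 2)]
      by_cases hji : j = i
      · subst hji
        split_ifs <;> omega
      · by_cases hqi : (j - 1) / 2 = i
        · have key := hS j hj1 hjl hqi hi0
          split_ifs <;> omega
        · by_cases hqp : (j - 1) / 2 = (i - 1) / 2
          · have k1 := hA j hj1 hjl hji
            rw [hqp] at k1
            split_ifs <;> omega
          · have k1 := hA j hj1 hjl hji
            split_ifs <;> omega
    have hS' : SKP (pvSwap l ((i - 1) / 2) i) ((i - 1) / 2) := by
      intro j hj1 hjl hq h0
      rw [hlen] at hjl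
      rw [hg j, hg (((i - 1) / 2 - 1) / 2)]
      have k1 := hA ((i - 1) / 2) (by omega) hpl (by omega)
      by_cases hji : j = i
      · subst hji
        split_ifs <;> omega
      · have k2 := hA j hj1 hjl hji
        rw [hq] at k2
        split_ifs <;> omega
    have hrec := siftUp_correct (pvSwap l ((i - 1) / 2) i) ((i - 1) / 2) (by omega) hA' hS'
    exact ⟨hrec.1, hrec.2.trans (pvSwap_perm l ((i - 1) / 2) i hpl hi)⟩
  · refine ⟨?_, List.Perm.refl l⟩
    intro j hj1 hjl
    by_cases hji : j = i
    · subst hji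
      have hle : ¬ l.getD ((j - 1) / 2) 0 > l.getD j 0 := fun hg => h ⟨hj1, hg⟩
      omega
    · exact hA j hj1 hjl hji
termination_by i

lemma heapify_step (l : List Int) (i mi : Nat) (hi : i < l.length) (hmi : mi < l.length)
    (hgt : l.getD mi 0 < l.getD i 0)
    (hchild : mi = 2 * i + 1 ∨ mi = 2 * i + 2)
    (hother : ∀ s : Nat, 1 ≤ s → s < l.length → (s - 1) / 2 = i → s ≠ mi →
      l.getD mi 0 ≤ l.getD s 0)
    (hA : AHD l i) (hS : SKP l i) :
    AHD (pvSwap l i mi) mi ∧ SKP (pvSwap l i mi) mi := by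
  have himi : i < mi := by omega
  have hlen : (pvSwap l i mi).length = l.length := length_pvSwap l i mi
  have hg : ∀ k, (pvSwap l i mi).getD k 0 =
      if k = mi then l.getD i 0 else if k = i then l.getD mi 0 else l.getD k 0 :=
    fun k => getD_pvSwap l i mi k hi hmi
  constructor
  · intro j hj1 hjl hjq
    rw [hlen] at hjl
    rw [hg j, hg ((j - 1) / 2)]
    by_cases hjmi : j = mi
    · subst hjmi
      split_ifs <;> omega
    · by_cases hji : j = i
      · subst hji
        have key := hS mi (by omega) hmi (by omega) hj1
        split_ifs <;> omega
      · by_cases hqi : (j - 1) / 2 = i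
        · have key := hother j hj1 hjl hqi hjmi
          split_ifs <;> omega
        · have key := hA j hj1 hjl hqi
          split_ifs <;> omega
  · intro j hj1 hjl hq h0
    rw [hlen] at hjl
    rw [hg j, hg ((mi - 1) / 2)]
    have hpmi : (mi - 1) / 2 = i := by omega
    have key := hA j hj1 hjl (by omega)
    rw [hq] at key
    rw [hpmi]
    split_ifs <;> omega

lemma heapify_correct (l : List Int) (i : Nat) (hi : i < l.length) (hA : AHD l i) (hS : SKP l i) :
    IsHeap (heapifyA l i) ∧ (heapifyA l i).Perm l := by
  rw [heapifyA]
  by_cases c1 : 2 * i + 1 < l.length ∧ l.getD (2 * i + 1) 0 < l.getD i 0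
  · by_cases c2 : 2 * i + 2 < l.length ∧ l.getD (2 * i + 2) 0 < l.getD (2 * i + 1) 0
    · have hm : heapifyMi l i = 2 * i + 2 := by
        unfold heapifyMi; rw [if_pos c1, if_pos c2]
      rw [hm]
      rw [dif_pos (by omega : (2 * i + 2 : Nat) ≠ i)]
      have hstep := heapify_step l i (2 * i + 2) hi c2.1 (lt_trans c2.2 c1.2) (Or.inr rfl)
        (fun s hs1 hs2 hs3 hs4 => by
          have : s = 2 * i + 1 := by omega
          subst this; exact le_of_lt c2.2) hA hS
      have hrec := heapify_correct (pvSwap l i (2 * i + 2)) (2 * i + 2)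
        (by rw [length_pvSwap]; exact c2.1) hstep.1 hstep.2
      exact ⟨hrec.1, hrec.2.trans (pvSwap_perm l i (2 * i + 2) hi c2.1)⟩
    · have hm : heapifyMi l i = 2 * i + 1 := by
        unfold heapifyMi; rw [if_pos c1, if_neg c2]
      rw [hm]
      rw [dif_pos (by omega : (2 * i + 1 : Nat) ≠ i)]
      have hstep := heapify_step l i (2 * i + 1) hi c1.1 c1.2 (Or.inl rfl)
        (fun s hs1 hs2 hs3 hs4 => by
          have hs : s = 2 * i + 2 := by omega
          subst hs
          have := (not_and.mp c2) hs2
          omega) hA hS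
      have hrec := heapify_correct (pvSwap l i (2 * i + 1)) (2 * i + 1)
        (by rw [length_pvSwap]; exact c1.1) hstep.1 hstep.2
      exact ⟨hrec.1, hrec.2.trans (pvSwap_perm l i (2 * i + 1) hi c1.1)⟩
  · by_cases c2 : 2 * i + 2 < l.length ∧ l.getD (2 * i + 2) 0 < l.getD i 0
    · have hm : heapifyMi l i = 2 * i + 2 := by
        unfold heapifyMi; rw [if_neg c1, if_pos c2]
      rw [hm]
      rw [dif_pos (by omega : (2 * i + 2 : Nat) ≠ i)]
      have hstep := heapify_step l i (2 * i + 2) hi c2.1 c2.2 (Or.inr rfl)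
        (fun s hs1 hs2 hs3 hs4 => by
          have hs : s = 2 * i + 1 := by omega
          subst hs
          have := (not_and.mp c1) hs2
          omega) hA hS
      have hrec := heapify_correct (pvSwap l i (2 * i + 2)) (2 * i + 2)
        (by rw [length_pvSwap]; exact c2.1) hstep.1 hstep.2
      exact ⟨hrec.1, hrec.2.trans (pvSwap_perm l i (2 * i + 2) hi c2.1)⟩
    · have hm : heapifyMi l i = i := by
        unfold heapifyMi; rw [if_neg c1, if_neg c2]
      rw [hm]
      rw [dif_neg (by simp : ¬ i ≠ i)]
      refine ⟨?_, List.Perm.refl l⟩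
      intro j hj1 hjl
      by_cases hq : (j - 1) / 2 = i
      · have hj : j = 2 * i + 1 ∨ j = 2 * i + 2 := by omega
        rcases hj with hj | hj <;> subst hj
        · have := (not_and.mp c1) hjl
          rw [hq]; omega
        · have := (not_and.mp c2) hjl
          rw [hq]; omega
      · exact hA j hj1 hjl hq
termination_by l.length - i
decreasing_by
  all_goals simp only [pvSwap, List.length_set]; omega

lemma heap_root_min (l : List Int) (h : IsHeap l) :
    ∀ j : Nat, j < l.length → l.getD 0 0 ≤ l.getD j 0 := by
  intro j
  induction j using Nat.strong_induction_on with
  | _ j ih =>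
    intro hj
    cases j with
    | zero => exact le_refl _
    | succ k =>
      have h1 : (k + 1 - 1) / 2 < k + 1 := by omega
      exact le_trans (ih _ h1 (lt_trans h1 hj)) (h (k + 1) (by omega) hj)

lemma insortB_perm (x : Int) : ∀ b : List Int, (insortB x b).Perm (x :: b) := by
  intro b
  induction b with
  | nil => simp [insortB]
  | cons y ys ih =>
    rw [insortB]
    split_ifs
    · exact List.Perm.refl _
    · exact (ih.cons y).trans (List.Perm.swap x y ys)

lemma insortB_sorted (x : Int) : ∀ b : List Int, b.Pairwise (· ≤ ·) →
    (insortB x b).Pairwise (· ≤ ·) := by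
  intro b
  induction b with
  | nil => intro _; simp [insortB]
  | cons y ys ih =>
    intro hs
    rw [List.pairwise_cons] at hs
    rw [insortB]
    split_ifs with hxy
    · rw [List.pairwise_cons]
      refine ⟨?_, List.pairwise_cons.mpr hs⟩
      intro z hz
      rcases List.mem_cons.mp hz with h | h
      · omega
      · have := hs.1 z h; omega
    · rw [List.pairwise_cons]
      refine ⟨?_, ih hs.2⟩
      intro z hz
      rcases List.mem_cons.mp ((insortB_perm x ys).mem_iff.mp hz) with h | h
      · subst h; omega
      · exact hs.1 z h

lemma step_sim (a b r : List Int) (q : List Int) (h : HInv a b) :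
    HInv (stepA (a, r) q).1 (stepB (b, r) q).1 ∧ (stepA (a, r) q).2 = (stepB (b, r) q).2 := by
  obtain ⟨hperm, hsort, hheap⟩ := h
  by_cases hq : q.getD 0 0 = 0
  · simp only [stepA, stepB, if_pos hq]
    have hAHU : AHU (a ++ [q.getD 1 0]) a.length := by
      intro j hj1 hjl hji
      simp only [List.length_append, List.length_cons, List.length_nil] at hjl
      have hj : j < a.length := by omega
      have hp : (j - 1) / 2 < a.length := by omega
      rw [List.getD_append _ _ _ _ hp, List.getD_append _ _ _ _ hj]
      exact hheap j hj1 hj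
    have hSKP : SKP (a ++ [q.getD 1 0]) a.length := by
      intro j hj1 hjl hq' h0
      simp only [List.length_append, List.length_cons, List.length_nil] at hjl
      omega
    have hcorr := siftUp_correct (a ++ [q.getD 1 0]) a.length (by simp) hAHU hSKP
    have hL : (a ++ [q.getD 1 0]).length - 1 = a.length := by simp
    rw [hL]
    refine ⟨⟨?_, insortB_sorted _ _ hsort, hcorr.1⟩, by trivial⟩
    exact (insortB_perm _ b).trans ((hperm.cons _).trans
      ((List.perm_append_singleton _ _).symm.trans hcorr.2.symm))
  · simp only [stepA, stepB, if_neg hq]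
    cases a with
    | nil =>
      have hb : b = [] := List.perm_nil.mp hperm
      subst hb
      rw [if_neg (by norm_num : ¬ ([] : List Int).length > 1),
        if_neg (by norm_num : ¬ ([] : List Int).length ≠ 0)]
      exact ⟨⟨List.Perm.nil, List.Pairwise.nil, fun j _ h2 => absurd h2 (by simp)⟩, rfl⟩
    | cons a0 t =>
      cases t with
      | nil =>
        have hb : b = [a0] := List.perm_singleton.mp hperm
        subst hb
        rw [if_neg (by norm_num : ¬ ([a0] : List Int).length > 1),
          if_pos (by norm_num : ([a0] : List Int).length ≠ 0)]
        exact ⟨⟨List.Perm.nil, List.Pairwise.nil, fun j _ h2 => absurd h2 (by simp)⟩, rfl⟩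
      | cons a1 t2 =>
        have hblen : b.length = t2.length + 2 := by simpa using hperm.length_eq
        obtain ⟨b0, bt, rfl⟩ : ∃ b0 bt, b = b0 :: bt := by
          cases b with
          | nil => simp at hblen
          | cons x xs => exact ⟨x, xs, rfl⟩
        have hb0a : b0 ≤ a0 := by
          have ha0b : a0 ∈ b0 :: bt := hperm.mem_iff.mpr (by simp)
          rcases List.mem_cons.mp ha0b with hcase | hcase
          · exact le_of_eq hcase.symm
          · exact (List.pairwise_cons.mp hsort).1 a0 hcase
        have hab0 : a0 ≤ b0 := by
          have hb0a' : b0 ∈ a0 :: a1 :: t2 := hperm.mem_iff.mp (by simp)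
          obtain ⟨k, hk, hek⟩ := List.getElem_of_mem hb0a'
          have hm := heap_root_min _ hheap k hk
          rw [List.getD_eq_getElem _ _ hk, hek] at hm
          simpa using hm
        have hb0 : b0 = a0 := le_antisymm hb0a hab0
        subst hb0
        rw [if_pos (by simp : (b0 :: a1 :: t2).length > 1)]
        have hrest : (a1 :: t2) ≠ [] := by simp
        have harr : ((b0 :: a1 :: t2).dropLast).set 0
              ((b0 :: a1 :: t2).getD ((b0 :: a1 :: t2).length - 1) 0)
            = (a1 :: t2).getLast hrest :: (a1 :: t2).dropLast := by
          rw [List.dropLast_cons₂, List.set_cons_zero]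
          congr 1
          have hlt : (a1 :: t2).length - 1 < (a1 :: t2).length := by simp
          rw [show (b0 :: a1 :: t2).length - 1 = ((a1 :: t2).length - 1) + 1 from by simp,
            List.getD_cons_succ, List.getD_eq_getElem _ _ hlt, List.getLast_eq_getElem]
        rw [harr]
        have hLlen : ((a1 :: t2).getLast hrest :: (a1 :: t2).dropLast).length
            = t2.length + 1 := by simp
        have hLk : ∀ k : Nat, 1 ≤ k → k < t2.length + 1 →
            ((a1 :: t2).getLast hrest :: (a1 :: t2).dropLast).getD k 0
              = (b0 :: a1 :: t2).getD k 0 := by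
          intro k h1 h2
          cases k with
          | zero => omega
          | succ m =>
            rw [List.getD_cons_succ, List.getD_cons_succ]
            have hm1 : m < ((a1 :: t2).dropLast).length := by simp; omega
            have hm2 : m < (a1 :: t2).length := by simp; omega
            rw [List.getD_eq_getElem _ _ hm1, List.getD_eq_getElem _ _ hm2,
              List.getElem_dropLast]
        have hAHD : AHD ((a1 :: t2).getLast hrest :: (a1 :: t2).dropLast) 0 := by
          intro j hj1 hjl hq'
          rw [hLlen] at hjl
          have hq3 : 1 ≤ (j - 1) / 2 := by omega
          rw [hLk j hj1 hjl, hLk ((j - 1) / 2) hq3 (by omega)]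
          exact hheap j hj1 (by simp; omega)
        have hSKP : SKP ((a1 :: t2).getLast hrest :: (a1 :: t2).dropLast) 0 := by
          intro j _ _ _ h0
          exact absurd h0 (by simp)
        have hcorr := heapify_correct _ 0 (by simp) hAHD hSKP
        have hrp : ((a1 :: t2).getLast hrest :: (a1 :: t2).dropLast).Perm (a1 :: t2) := by
          conv_rhs => rw [← List.dropLast_append_getLast hrest]
          exact (List.perm_append_singleton _ _).symm
        refine ⟨⟨?_, (List.pairwise_cons.mp hsort).2, hcorr.1⟩, by simp⟩
        exact (hperm.cons_inv).trans (hrp.symm.trans hcorr.2.symm)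

lemma fold_sim : ∀ (Q : List (List Int)) (sA sB : List Int × List Int),
    HInv sA.1 sB.1 → sA.2 = sB.2 → (Q.foldl stepA sA).2 = (Q.foldl stepB sB).2 := by
  intro Q
  induction Q with
  | nil => intro sA sB _ h2; simpa using h2
  | cons q Qs ih =>
    intro sA sB h1 h2
    obtain ⟨a, rA⟩ := sA
    obtain ⟨b, rB⟩ := sB
    simp only at h1 h2
    subst h2
    have hs := step_sim a b rA q h1
    simpa only [List.foldl_cons] using ih (stepA (a, rA) q) (stepB (b, rA) q) hs.1 hs.2

-- ===== VERDICT (by name: the statement is the Claim_ definition above) =====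
theorem minHeap_spec : Claim_equal_minHeap := by
  intro N Q _ _
  unfold Spec_minHeap minHeap minHeap_alt
  exact fold_sim Q ([], []) ([], [])
    ⟨List.Perm.refl _, List.Pairwise.nil, fun j _ h2 => absurd h2 (by simp)⟩ rfl
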